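-- pv_equiv track=rewrite | github.com/horno/protein-folding | folder.py | is_protein_valid
-- ===== SOURCE A (Python) =====
-- def is_protein_valid(protein):
--     seen = set()
--     for i in range(1, len(protein)):
--         x = protein[i][2][0]
--         y = protein[i][2][1]
--         cardinal = (x,y)
--         if cardinal in seen:
--             return False
--         seen.add(cardinal)
--     return True
-- ===== SOURCE B (Python) =====
-- def is_protein_valid(protein):
--     def distinct(cs):
--         if not cs:
--             return True
--         return cs[0] not in cs[1:] and distinct(cs[1:])
--     return distinct([(p[2][0], p[2][1]) for p in protein[1:]])
-- ===== Notes on version B (the rewrite author's own statement) =====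
-- stated objective: alternative
-- what changed: Replaced A's forward scan with an incrementally grown hash set and early return by a recursive head-vs-tail distinctness check over the extracted coordinate list using plain list membership, maintaining no auxiliary set at all.
import Mathlib
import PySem

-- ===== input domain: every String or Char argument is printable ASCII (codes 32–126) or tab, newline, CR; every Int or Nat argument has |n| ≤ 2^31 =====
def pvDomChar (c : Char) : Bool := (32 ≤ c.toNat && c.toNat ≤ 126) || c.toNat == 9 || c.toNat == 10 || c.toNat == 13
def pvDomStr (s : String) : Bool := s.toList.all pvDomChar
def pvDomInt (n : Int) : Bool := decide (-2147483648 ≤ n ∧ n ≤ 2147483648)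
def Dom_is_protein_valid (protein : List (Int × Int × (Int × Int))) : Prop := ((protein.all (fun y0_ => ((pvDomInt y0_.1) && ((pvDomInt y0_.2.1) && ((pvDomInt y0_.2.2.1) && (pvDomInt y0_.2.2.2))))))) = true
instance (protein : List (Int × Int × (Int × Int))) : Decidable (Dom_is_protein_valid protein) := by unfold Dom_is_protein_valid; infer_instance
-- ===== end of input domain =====

-- B replaces A's hash-set scan with early return by a recursive head-vs-tail
-- distinctness check over the extracted coordinate list (no auxiliary set);
-- objective: alternative.


-- ===== PORT A =====
-- the 'for i in range(1, len(protein))' loop with the running 'seen' set and early return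
def pvALoop (protein : List (Int × Int × (Int × Int))) :
    List Int → PySem.Set (Int × Int) → Bool
  | [], _ => true
  | i :: is, seen =>
    let x := (PySem.List.pyGetD protein i (0, 0, (0, 0))).2.2.1
    let y := (PySem.List.pyGetD protein i (0, 0, (0, 0))).2.2.2
    let cardinal := (x, y)
    if PySem.Set.contains seen cardinal then false
    else pvALoop protein is (PySem.Set.add seen cardinal)

def is_protein_valid (protein : List (Int × Int × (Int × Int))) : Bool :=
  pvALoop protein (PySem.List.pyRange 1 (PySem.List.len protein) 1) PySem.Set.empty

-- ===== PORT B =====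
-- 'distinct(cs)': cs[0] not in cs[1:] and distinct(cs[1:]).  Python's list
-- membership 'in' is exact as List.contains here (decidable equality on int pairs).
def pvDistinct : List (Int × Int) → Bool
  | [] => true
  | c :: cs => (!cs.contains c) && pvDistinct cs

def is_protein_valid_alt (protein : List (Int × Int × (Int × Int))) : Bool :=
  pvDistinct ((PySem.List.slice protein (some 1) none).map (fun p => (p.2.2.1, p.2.2.2)))

-- ===== PRECONDITION & SPEC =====
def Spec_is_protein_valid (protein : List (Int × Int × (Int × Int))) (out : Bool) : Prop := out = is_protein_valid_alt protein
instance (protein : List (Int × Int × (Int × Int))) (out : Bool) : Decidable (Spec_is_protein_valid protein out) := by unfold Spec_is_protein_valid; infer_instance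

-- ===== CLAIM (what is proved, stated in full; the proofs are below) =====
def Claim_equal_is_protein_valid : Prop := ∀ (protein : List (Int × Int × (Int × Int))), Dom_is_protein_valid protein → Spec_is_protein_valid protein (is_protein_valid protein)

-- ===== LEMMAS AND PROOFS =====

-- abstract scan over the coordinate list, stripped of the indexing
def pvScan : List (Int × Int) → PySem.Set (Int × Int) → Bool
  | [], _ => true
  | c :: cs, seen =>
    if PySem.Set.contains seen c then false else pvScan cs (PySem.Set.add seen c)

lemma pvALoop_eq_scan (rest : List (Int × Int × (Int × Int))) :
    ∀ (pre : List (Int × Int × (Int × Int))) (seen : PySem.Set (Int × Int)),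
    pvALoop (pre ++ rest) (PySem.List.pyRange (pre.length : Int) (PySem.List.len (pre ++ rest)) 1) seen
      = pvScan (rest.map (fun p => (p.2.2.1, p.2.2.2))) seen := by
  induction rest with
  | nil =>
    intro pre seen
    simp only [List.append_nil]
    rw [show PySem.List.pyRange (pre.length : Int) (PySem.List.len pre) 1 = [] from
      PySem.List.pyRange_one_eq_nil (by simp [PySem.List.len_eq])]
    rfl
  | cons r rs ih =>
    intro pre seen
    have hlt : (pre.length : Int) < PySem.List.len (pre ++ r :: rs) := by
      simp [PySem.List.len_eq]
    rw [PySem.List.pyRange_one_cons hlt]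
    have hget : PySem.List.pyGetD (pre ++ r :: rs) (pre.length : Int) (0, 0, (0, 0)) = r := by
      simp [PySem.List.pyGetD_natCast, List.getD]
    simp only [pvALoop, hget]
    by_cases h : r.2.2 ∈ seen
    · simp [pvScan, PySem.Set.contains, h]
    · have hrec := ih (pre ++ [r]) (PySem.Set.add seen r.2.2)
      simp only [List.append_assoc, List.singleton_append, List.length_append,
        List.length_cons, List.length_nil, Nat.cast_add, Nat.cast_one] at hrec
      simpa [pvScan, PySem.Set.add, PySem.Set.contains, h] using hrec

lemma pvScan_iff (cs : List (Int × Int)) :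
    ∀ (seen : PySem.Set (Int × Int)),
    pvScan cs seen = true ↔ cs.Nodup ∧ ∀ c ∈ cs, c ∉ seen := by
  induction cs with
  | nil => intro seen; simp [pvScan]
  | cons c cs ih =>
    intro seen
    by_cases h : c ∈ seen
    · simp only [pvScan, PySem.Set.contains]
      rw [if_pos (by simpa using h)]
      constructor
      · intro habs; exact absurd habs (by simp)
      · rintro ⟨-, hall⟩; exact absurd h (hall c (by simp))
    · simp only [pvScan, PySem.Set.contains]
      rw [if_neg (by simpa using h), ih]
      constructor
      · rintro ⟨hnd, hall⟩
        have hcc : c ∉ cs := fun hc =>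
          (hall c hc) ((PySem.Set.mem_add seen c c).mpr (Or.inr rfl))
        refine ⟨List.nodup_cons.mpr ⟨hcc, hnd⟩, ?_⟩
        intro d hd
        rcases List.mem_cons.mp hd with hd | hd
        · exact hd ▸ h
        · intro hmem
          exact hall d hd ((PySem.Set.mem_add seen c d).mpr (Or.inl hmem))
      · rintro ⟨hnd, hall⟩
        obtain ⟨hcc, hnd2⟩ := List.nodup_cons.mp hnd
        refine ⟨hnd2, fun d hd hmem => ?_⟩
        rcases (PySem.Set.mem_add seen c d).mp hmem with hm | hm
        · exact hall d (List.mem_cons_of_mem c hd) hm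
        · exact hcc (hm ▸ hd)

lemma pvDistinct_iff_nodup (cs : List (Int × Int)) :
    pvDistinct cs = true ↔ cs.Nodup := by
  induction cs with
  | nil => simp [pvDistinct]
  | cons c cs ih => simp [pvDistinct, ih, List.nodup_cons]

lemma alt_iff_nodup (protein : List (Int × Int × (Int × Int))) :
    is_protein_valid_alt protein = true ↔
      ((protein.drop 1).map (fun p => (p.2.2.1, p.2.2.2))).Nodup := by
  unfold is_protein_valid_alt
  rw [show PySem.List.slice protein (some 1) none = protein.drop 1 from by
    simpa using PySem.List.slice_from_natCast (xs := protein) (a := 1)]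
  exact pvDistinct_iff_nodup _

lemma a_iff_nodup (protein : List (Int × Int × (Int × Int))) :
    is_protein_valid protein = true ↔
      ((protein.drop 1).map (fun p => (p.2.2.1, p.2.2.2))).Nodup := by
  unfold is_protein_valid
  cases protein with
  | nil => simp [pysem, pvALoop]
  | cons hd tl =>
    simp only [List.drop_succ_cons, List.drop_zero]
    have h1 := pvALoop_eq_scan tl [hd] PySem.Set.empty
    rw [show pvALoop (hd :: tl) (PySem.List.pyRange 1 (PySem.List.len (hd :: tl)) 1) PySem.Set.empty
          = pvScan (tl.map (fun p => (p.2.2.1, p.2.2.2))) PySem.Set.empty from by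
        simpa [PySem.Set.empty] using h1,
      pvScan_iff]
    simp [PySem.Set.empty]

-- ===== VERDICT (by name: the statement is the Claim_ definition above) =====
theorem is_protein_valid_spec : Claim_equal_is_protein_valid := by
  intro protein _
  unfold Spec_is_protein_valid
  have ha := a_iff_nodup protein
  have hb := alt_iff_nodup protein
  cases hA : is_protein_valid protein <;> cases hB : is_protein_valid_alt protein <;>
    simp_all
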